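-- pv_equiv track=rewrite | github.com/ColeOliva/endToEndNeuroAnalysis | src/io_bids.py | _parse_bids_entities
-- ===== SOURCE A (Python) =====
-- def _parse_bids_entities(file_name: str) -> dict[str, str | None]:
--     """Parse BIDS entities from a file name stem."""
--     stem_parts = file_name.split("_")
--     entities: dict[str, str | None] = {
--         "sub": None,
--         "ses": None,
--         "task": None,
--         "run": None,
--         "acq": None,
--         "recording": None,
--         "space": None,
--         "split": None,
--     }
--
--     for part in stem_parts:
--         if "-" not in part:
--             continue
--         key, value = part.split("-", maxsplit=1)
--         if key in entities:
--             entities[key] = value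
--
--     return entities
-- ===== SOURCE B (Python) =====
-- _BIDS_KEYS = ("sub", "ses", "task", "run", "acq", "recording", "space", "split")
--
--
-- def _parse_bids_entities(file_name: str) -> dict[str, str | None]:
--     """Parse BIDS entities from a file name stem.
--
--     Per-key backward search: for each known entity key, scan the underscore
--     parts from the end for one starting with 'key-' (last occurrence wins)
--     and take the remainder of that part as the value; no key-value parsing
--     of unknown parts and no mutable dict filled by a forward loop.
--     """
--     parts = file_name.split("_")
--     out: dict[str, str | None] = {}
--     for key in _BIDS_KEYS:
--         prefix = key + "-"
--         value = None
--         for part in reversed(parts):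
--             if part.startswith(prefix):
--                 value = part[len(prefix):]
--                 break
--         out[key] = value
--     return out
-- ===== Notes on version B (the rewrite author's own statement) =====
-- stated objective: alternative
-- what changed: B replaces A's single forward pass that parses every hyphenated part and mutates a pre-initialized dict with a per-key backward search: for each of the 8 known keys it scans the underscore parts in reverse for one whose prefix is that key followed by a hyphen (so the last occurrence wins) and slices off the value; unknown parts are never parsed.
import Mathlib
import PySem

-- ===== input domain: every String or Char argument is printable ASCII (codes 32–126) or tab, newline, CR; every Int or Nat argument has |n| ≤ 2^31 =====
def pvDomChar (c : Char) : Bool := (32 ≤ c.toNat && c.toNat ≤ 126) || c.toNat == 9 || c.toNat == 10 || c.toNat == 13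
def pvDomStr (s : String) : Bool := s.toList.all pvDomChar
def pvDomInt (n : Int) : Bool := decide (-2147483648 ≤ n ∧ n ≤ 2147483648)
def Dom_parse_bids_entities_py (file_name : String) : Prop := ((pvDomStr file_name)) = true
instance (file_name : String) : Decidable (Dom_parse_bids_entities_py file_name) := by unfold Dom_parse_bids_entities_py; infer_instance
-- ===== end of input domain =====

-- B replaces A's forward parse-every-part loop over a pre-initialized dict by a
-- per-key backward prefix search over the parts (objective: alternative, same result).

-- ===== PORT A =====
-- loop body of A's 'for part in stem_parts' (helper so lemmas can cite it)
def pvStepA (d : PySem.Dict String (Option String)) (part : String) :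
    PySem.Dict String (Option String) :=
  if PySem.Str.isIn "-" part then
    match PySem.Str.splitMax? part "-" 1 with
    | some (key :: value :: _) => if d.contains key then d.insert key (some value) else d
    | _ => d
  else d

-- '.split("_")': split? is always 'some' for the nonempty separator "_", so '.getD []' never fires
def parse_bids_entities_py (file_name : String) : List (String × Option String) :=
  let stem_parts := (PySem.Str.split? file_name "_").getD []
  let entities : PySem.Dict String (Option String) :=
    PySem.Dict.ofList [("sub", none), ("ses", none), ("task", none), ("run", none),
      ("acq", none), ("recording", none), ("space", none), ("split", none)]
  (stem_parts.foldl pvStepA entities).items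

-- ===== PORT B =====
def pvBidsKeys : List String := ["sub", "ses", "task", "run", "acq", "recording", "space", "split"]

-- B's inner loop 'for part in reversed(parts): if part.startswith(prefix): … break'
-- is the first match in the reversed list; 'part[len(prefix):]' is the tail slice.
def parse_bids_entities_py_alt (file_name : String) : List (String × Option String) :=
  let parts := (PySem.Str.split? file_name "_").getD []
  pvBidsKeys.map (fun key =>
    (key, (parts.reverse.find? (fun part => PySem.Str.startswith part (key ++ "-"))).map
            (fun part => PySem.Str.slice part (some (PySem.Str.len (key ++ "-"))) none)))

-- ===== PRECONDITION & SPEC =====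
def Spec_parse_bids_entities_py (file_name : String) (out : List (String × Option String)) : Prop := out = parse_bids_entities_py_alt file_name
instance (file_name : String) (out : List (String × Option String)) : Decidable (Spec_parse_bids_entities_py file_name out) := by unfold Spec_parse_bids_entities_py; infer_instance

-- ===== CLAIM (what is proved, stated in full; the proofs are below) =====
def Claim_equal_parse_bids_entities_py : Prop := ∀ (file_name : String), Dom_parse_bids_entities_py file_name → Spec_parse_bids_entities_py file_name (parse_bids_entities_py file_name)

-- ===== LEMMAS AND PROOFS =====

-- go with maxsplit exhausted returns the rest as one last piece
lemma pvGo_zero (fuel : Nat) (l cur : List Char) (acc : List (List Char)) :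
    PySem.Chars.splitOnMax.go ['-'] fuel 0 l cur acc = ((cur.reverse ++ l) :: acc).reverse := by
  cases fuel <;> cases l <;> simp [PySem.Chars.splitOnMax.go]

-- one allowed split on '-': cut at the first '-', keep the rest whole
lemma pvGo_one (fuel : Nat) (l cur : List Char) (acc : List (List Char)) (h : l.length < fuel) :
    PySem.Chars.splitOnMax.go ['-'] fuel 1 l cur acc =
      if '-' ∈ l then
        acc.reverse ++ [cur.reverse ++ l.takeWhile (· ≠ '-'), (l.dropWhile (· ≠ '-')).tail]
      else acc.reverse ++ [cur.reverse ++ l] := by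
  induction fuel generalizing l cur acc with
  | zero => omega
  | succ n ih =>
    cases l with
    | nil => simp [PySem.Chars.splitOnMax.go]
    | cons c rest =>
      rw [PySem.Chars.splitOnMax.go]
      by_cases hc : c = '-'
      · subst hc
        simp [List.isPrefixOf, pvGo_zero]
      · have hc' : ('-' : Char) ≠ c := fun hh => hc hh.symm
        rw [if_neg (by omega), if_neg (by simp [List.isPrefixOf]; exact hc'),
          ih rest (c :: cur) acc (by simpa using Nat.lt_of_succ_lt_succ (by simpa using h))]
        by_cases hm : '-' ∈ rest <;> simp [hc, hc', List.mem_cons, hm]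

-- splitOnMax with maxsplit 1 on the single-char separator '-'
lemma pvSplitOnMax_one (p : List Char) :
    PySem.Chars.splitOnMax p ['-'] 1 =
      if '-' ∈ p then [p.takeWhile (· ≠ '-'), (p.dropWhile (· ≠ '-')).tail] else [p] := by
  unfold PySem.Chars.splitOnMax
  rw [if_neg (by omega)]
  have := pvGo_one (p.length + 1) p [] [] (by omega)
  simpa using this

lemma pvIsIn_dash (p : List Char) : PySem.Chars.isIn ['-'] p = true ↔ '-' ∈ p := by
  rw [PySem.Chars.isIn_iff_infix, List.singleton_infix_iff]

-- prefix 'key-' characterises the part's parsed key (for keys without '-')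
lemma pvStartswith_iff (k p : List Char) (hk : '-' ∉ k) :
    (k ++ ['-']).isPrefixOf p = true ↔ ('-' ∈ p ∧ p.takeWhile (· ≠ '-') = k) := by
  induction k generalizing p with
  | nil =>
    cases p with
    | nil => simp
    | cons c rest =>
      by_cases hc : c = '-'
      · subst hc; simp [List.isPrefixOf]
      · have hc' : ('-' : Char) ≠ c := fun hh => hc hh.symm
        simp [List.isPrefixOf, hc, hc']
  | cons a k' ih =>
    have ha : a ≠ '-' := fun hh => hk (hh ▸ List.mem_cons_self)
    have hk' : '-' ∉ k' := fun hh => hk (List.mem_cons_of_mem _ hh)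
    cases p with
    | nil => simp
    | cons c rest =>
      by_cases hca : c = a
      · subst hca
        have hc' : ('-' : Char) ≠ c := fun hh => ha hh.symm
        simp [ha, hc', List.mem_cons, ih rest hk']
      · have hac : (a == c) = false := beq_eq_false_iff_ne.mpr (fun hh => hca hh.symm)
        simp only [List.cons_append, List.isPrefixOf, hac, Bool.false_and]
        constructor
        · exact fun hh => absurd hh (by decide)
        · rintro ⟨-, htw⟩
          by_cases hc : c = '-'
          · subst hc; simp at htw
          · rw [List.takeWhile_cons, if_pos (by simpa using hc)] at htw
            rw [List.cons.injEq] at htw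
            exact absurd htw.1 hca

-- the value slice: everything after the first '-' when 'key-' is a prefix
lemma pvValue_eq (k p : List Char) (hk : '-' ∉ k) (h : (k ++ ['-']).isPrefixOf p = true) :
    (p.dropWhile (· ≠ '-')).tail = p.drop (k.length + 1) := by
  induction k generalizing p with
  | nil =>
    obtain ⟨r, rfl⟩ := List.isPrefixOf_iff_prefix.mp h
    simp
  | cons a k' ih =>
    have ha : a ≠ '-' := fun hh => hk (hh ▸ List.mem_cons_self)
    obtain ⟨r, rfl⟩ := List.isPrefixOf_iff_prefix.mp h
    simp only [List.cons_append, List.dropWhile_cons, List.length_cons]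
    rw [if_pos (by simpa using ha)]
    have := ih ((k' ++ ['-']) ++ r) (fun hh => hk (List.mem_cons_of_mem _ hh))
      (List.isPrefixOf_iff_prefix.mpr ⟨r, rfl⟩)
    simpa using this

-- Str.startswith with prefix 'k-' in terms of the part's characters
lemma pvSw_iff (p k : String) (hk : '-' ∉ k.toList) :
    PySem.Str.startswith p (k ++ "-") = true ↔
      ('-' ∈ p.toList ∧ p.toList.takeWhile (· ≠ '-') = k.toList) := by
  have hklist : (k ++ "-").toList = k.toList ++ ['-'] := by simp
  rw [show PySem.Str.startswith p (k ++ "-") = (k.toList ++ ['-']).isPrefixOf p.toList by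
    simp [PySem.Chars.startswith, hklist]]
  exact pvStartswith_iff _ _ hk

-- A's '.split("-", maxsplit=1)' on a part containing '-'
lemma pvSplitMax_eq (p : String) (hmem : '-' ∈ p.toList) :
    PySem.Str.splitMax? p "-" 1 =
      some [String.ofList (p.toList.takeWhile (· ≠ '-')),
            String.ofList ((p.toList.dropWhile (· ≠ '-')).tail)] := by
  have hdl : ("-" : String).toList = ['-'] := rfl
  simp [PySem.Str.splitMax?, PySem.Chars.splitMax?, hdl, pvSplitOnMax_one, hmem]

-- contains is preserved by one A-step and hence by the whole fold
lemma pvStepA_contains (d : PySem.Dict String (Option String)) (p k : String) :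
    (pvStepA d p).contains k = d.contains k := by
  unfold pvStepA
  split
  · rcases hsp : PySem.Str.splitMax? p "-" 1 with _ | l
    · rfl
    · match l with
      | [] => rfl
      | [_] => rfl
      | key :: value :: rest =>
        simp only []
        by_cases hkeq : k = key
        · subst hkeq
          by_cases hc : d.contains k = true
          · rw [if_pos hc, PySem.Dict.contains_insert]; simp [hc]
          · rw [if_neg hc]
        · by_cases hc : d.contains key = true
          · rw [if_pos hc, PySem.Dict.contains_insert]; simp [hkeq]
          · rw [if_neg hc]
  · rfl

lemma pvFold_contains (parts : List String) (d : PySem.Dict String (Option String)) (k : String) :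
    (parts.foldl pvStepA d).contains k = d.contains k := by
  induction parts generalizing d with
  | nil => rfl
  | cons p t ih => rw [List.foldl_cons, ih, pvStepA_contains]

lemma pvStepA_keys (d : PySem.Dict String (Option String)) (p : String) :
    (pvStepA d p).keys = d.keys := by
  unfold pvStepA
  split
  · rcases hsp : PySem.Str.splitMax? p "-" 1 with _ | l
    · rfl
    · match l with
      | [] => rfl
      | [_] => rfl
      | key :: value :: rest =>
        simp only []
        by_cases hc : d.contains key = true
        · rw [if_pos hc, PySem.Dict.keys_insert_of_contains _ _ hc]
        · rw [if_neg hc]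
  · rfl

lemma pvFold_keys (parts : List String) (d : PySem.Dict String (Option String)) :
    (parts.foldl pvStepA d).keys = d.keys := by
  induction parts generalizing d with
  | nil => rfl
  | cons p t ih => rw [List.foldl_cons, ih, pvStepA_keys]

-- A's step on a part matching B's prefix test writes exactly B's slice
lemma pvStepA_match (d : PySem.Dict String (Option String)) (p k : String)
    (hk : '-' ∉ k.toList) (hc : d.contains k = true)
    (h : PySem.Str.startswith p (k ++ "-") = true) :
    (pvStepA d p).get? k =
      some (some (PySem.Str.slice p (some (PySem.Str.len (k ++ "-"))) none)) := by
  have hklist : (k ++ "-").toList = k.toList ++ ['-'] := by simp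
  obtain ⟨hmem, htake⟩ := (pvSw_iff p k hk).mp h
  have hpfx : (k.toList ++ ['-']).isPrefixOf p.toList = true :=
    (pvStartswith_iff _ _ hk).mpr ⟨hmem, htake⟩
  have hisin : PySem.Str.isIn "-" p = true := by
    have : PySem.Chars.isIn ['-'] p.toList = true := (pvIsIn_dash _).mpr hmem
    simpa using this
  have hval : String.ofList ((p.toList.dropWhile (· ≠ '-')).tail) =
      PySem.Str.slice p (some (PySem.Str.len (k ++ "-"))) none := by
    have hlen : PySem.Str.len (k ++ "-") = ((k.toList.length + 1 : Nat) : Int) := by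
      simp [PySem.Str.len, hklist]
    have hbr : (PySem.Str.slice p (some ((k.toList.length + 1 : Nat) : Int)) none).toList =
        PySem.List.slice p.toList (some ((k.toList.length + 1 : Nat) : Int)) none := by simp
    have hsl : (PySem.Str.slice p (some ((k.toList.length + 1 : Nat) : Int)) none).toList =
        p.toList.drop (k.toList.length + 1) := by
      rw [hbr]; exact PySem.List.slice_from_natCast p.toList (k.toList.length + 1)
    rw [hlen]
    calc String.ofList ((p.toList.dropWhile (· ≠ '-')).tail)
        = String.ofList ((PySem.Str.slice p (some ((k.toList.length + 1 : Nat) : Int)) none).toList) := by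
          rw [hsl, pvValue_eq k.toList p.toList hk hpfx]
      _ = _ := String.ofList_toList
  unfold pvStepA
  rw [if_pos hisin, pvSplitMax_eq p hmem]
  simp only [htake, String.ofList_toList]
  rw [if_pos hc, PySem.Dict.get?_insert_self, hval]

-- A's step on a non-matching part leaves the slot of k untouched
lemma pvStepA_nomatch (d : PySem.Dict String (Option String)) (p k : String)
    (hk : '-' ∉ k.toList) (h : PySem.Str.startswith p (k ++ "-") = false) :
    (pvStepA d p).get? k = d.get? k := by
  unfold pvStepA
  by_cases hin : PySem.Str.isIn "-" p = true
  · rw [if_pos hin]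
    have hmem : '-' ∈ p.toList := by
      refine (pvIsIn_dash _).mp ?_
      simpa using hin
    rw [pvSplitMax_eq p hmem]
    simp only []
    by_cases hc : d.contains (String.ofList (p.toList.takeWhile (· ≠ '-'))) = true
    · rw [if_pos hc]
      apply PySem.Dict.get?_insert_of_ne
      intro hkeq
      have htake : p.toList.takeWhile (· ≠ '-') = k.toList := by
        rw [hkeq]; simp [String.toList_ofList]
      exact absurd (h ▸ (pvSw_iff p k hk).mpr ⟨hmem, htake⟩) (by decide)
    · rw [if_neg hc]
  · rw [if_neg hin]

-- the fold's slot at k holds the LAST matching part = the first in the reversed list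
lemma pvFold_get (k : String) (hk : '-' ∉ k.toList) (parts : List String)
    (d : PySem.Dict String (Option String)) (hc : d.contains k = true) :
    (parts.foldl pvStepA d).get? k =
      match parts.reverse.find? (fun p => PySem.Str.startswith p (k ++ "-")) with
      | some p => some (some (PySem.Str.slice p (some (PySem.Str.len (k ++ "-"))) none))
      | none => d.get? k := by
  induction parts using List.reverseRecOn with
  | nil => rfl
  | append_singleton t p ih =>
    rw [List.foldl_append, List.foldl_cons, List.foldl_nil, List.reverse_append]
    simp only [List.reverse_cons, List.reverse_nil, List.nil_append, List.singleton_append,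
      List.find?_cons]
    by_cases hp : PySem.Str.startswith p (k ++ "-") = true
    · rw [hp]
      exact pvStepA_match _ _ _ hk (by rw [pvFold_contains, hc]) hp
    · rw [Bool.not_eq_true] at hp
      rw [hp, pvStepA_nomatch _ _ _ hk hp, ih]

-- A's pre-initialized dict, named so the main lemma can cite it
def pvD0 : PySem.Dict String (Option String) :=
  PySem.Dict.ofList [("sub", none), ("ses", none), ("task", none), ("run", none),
    ("acq", none), ("recording", none), ("space", none), ("split", none)]

-- the fold's items are exactly B's per-key answers
lemma pvMain (parts : List String) :
    (parts.foldl pvStepA pvD0).items =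
      pvBidsKeys.map (fun key =>
        (key, (parts.reverse.find? (fun part => PySem.Str.startswith part (key ++ "-"))).map
                (fun part => PySem.Str.slice part (some (PySem.Str.len (key ++ "-"))) none))) := by
  have hkeys : (parts.foldl pvStepA pvD0).keys = pvBidsKeys := by
    rw [pvFold_keys]; decide
  have hnodup : (parts.foldl pvStepA pvD0).keys.Nodup := by rw [hkeys]; decide
  rw [PySem.Dict.items_eq_map_keys _ hnodup none, hkeys]
  apply List.map_congr_left
  intro k hkmem
  simp only [pvBidsKeys, List.mem_cons, List.not_mem_nil, or_false] at hkmem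
  have hprops : '-' ∉ k.toList ∧ pvD0.contains k = true ∧ pvD0.get? k = some none := by
    rcases hkmem with rfl | rfl | rfl | rfl | rfl | rfl | rfl | rfl <;>
      exact ⟨by decide, by decide, by decide⟩
  obtain ⟨hk, hc, hget0⟩ := hprops
  have hfold := pvFold_get k hk parts pvD0 hc
  cases hfind : parts.reverse.find? (fun part => PySem.Str.startswith part (k ++ "-")) with
  | none =>
    rw [hfind] at hfold
    simp [PySem.Dict.getD_eq_get?_getD, hfold, hget0]
  | some p =>
    rw [hfind] at hfold
    simp [PySem.Dict.getD_eq_get?_getD, hfold]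

-- ===== VERDICT (by name: the statement is the Claim_ definition above) =====
theorem parse_bids_entities_py_spec : Claim_equal_parse_bids_entities_py := by
  intro file_name _
  unfold Spec_parse_bids_entities_py
  exact pvMain ((PySem.Str.split? file_name "_").getD [])
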